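-- pv_equiv track=rewrite | github.com/mirarzf/aoc2022 | pysolutions/day08/day08.py | getVisionFromSide
-- ===== SOURCE A (Python) =====
-- def getVisionFromSide(treeGrid, side:str, row:int):
--     if side == "left" or side == "right":
--         treeRow = treeGrid[row]
--         nline = len(treeRow)
--     else: # side == "up" or side == "down"
--         treeRow = [treeline[row] for treeline in treeGrid]
--         nline = len(treeRow)
--
--     visionFromSide = [True for i in range(nline)]
--
--     if side == "left" or side == "up":
--         previousTree = treeRow[0]
--         currTree = 0
--         for i in range(1, nline-1):
--             currTree = treeRow[i]
--             if previousTree >= currTree: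
--                 visionFromSide[i] = False
--             else:
--                 previousTree = currTree
--
--     if side == "right" or side == "down":
--         previousTree = treeRow[-1]
--         currTree = 0
--         for i in range(nline-2, -1, -1):
--             currTree = treeRow[i]
--             if previousTree >= currTree:
--                 visionFromSide[i] = False
--             else:
--                 previousTree = currTree
--
--     return visionFromSide
-- ===== SOURCE B (Python) =====
-- def _runningMax(heights):
--     table = []
--     best = None
--     for h in heights:
--         best = h if best is None or h > best else best
--         table.append(best)
--     return table
--
-- def getVisionFromSide(treeGrid, side: str, row: int):
--     if side == "left" or side == "right":
--         treeRow = treeGrid[row]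
--     else:
--         treeRow = [treeline[row] for treeline in treeGrid]
--     n = len(treeRow)
--     if side == "left" or side == "up":
--         highest = _runningMax(treeRow)
--         return [i == 0 or treeRow[i] > highest[i - 1] for i in range(n)]
--     if side == "right" or side == "down":
--         highest = _runningMax(treeRow[::-1])[::-1]
--         return [i == n - 1 or treeRow[i] > highest[i + 1] for i in range(n)]
--     return [True] * n
-- ===== Notes on version B (the rewrite author's own statement) =====
-- stated objective: alternative
-- what changed: A marks invisible trees in place with a running-max variable inside two direction-specific index loops over a mutable all-True list; B builds a running-maximum table once (over the row, or its reverse for right/down) and produces the result as a single symmetric comprehension comparing each tree against the table, with no mutation.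
-- intended difference: For side 'left'/'up' on rows of length >= 2 whose last tree is not strictly taller than everything before it, A's loop range(1, nline-1) never judges the last index and returns True there, while B returns False, the intended answer: that tree is not visible from that side (A's right/down loop does judge the analogous index 0). — e.g. on getVisionFromSide([[2, 1]], "left", 0): A returns [true, true], B returns [true, false]
import Mathlib
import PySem

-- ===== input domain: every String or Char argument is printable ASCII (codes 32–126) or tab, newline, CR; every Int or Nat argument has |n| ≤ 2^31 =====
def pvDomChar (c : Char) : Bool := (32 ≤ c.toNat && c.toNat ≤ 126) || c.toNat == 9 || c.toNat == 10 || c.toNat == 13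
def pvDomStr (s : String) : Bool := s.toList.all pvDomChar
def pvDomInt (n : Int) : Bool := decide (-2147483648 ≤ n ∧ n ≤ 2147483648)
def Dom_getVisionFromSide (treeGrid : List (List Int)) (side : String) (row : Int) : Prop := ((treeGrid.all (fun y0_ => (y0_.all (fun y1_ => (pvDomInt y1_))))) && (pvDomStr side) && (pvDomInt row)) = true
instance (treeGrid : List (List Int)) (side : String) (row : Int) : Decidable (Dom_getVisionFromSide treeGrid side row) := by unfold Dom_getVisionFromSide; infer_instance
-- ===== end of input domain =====

-- B replaces A's two in-place running-max marking loops by a running-maximum table built once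
-- and a symmetric comprehension reading it; on left/up it judges the last tree, which A never does.

-- ===== PORT A =====
-- the loop body shared by A's two marking loops (textually identical Python code in both)
def visLoopA (treeRow : List Int) (st : Int × List Bool) (i : Int) : Int × List Bool :=
  let currTree := PySem.List.pyGetD treeRow i 0
  if st.1 ≥ currTree then (st.1, PySem.List.pySetD st.2 i false)
  else (currTree, st.2)

def getVisionFromSide (treeGrid : List (List Int)) (side : String) (row : Int) : List Bool :=
  let treeRow : List Int :=
    if side == "left" || side == "right" then (PySem.List.pyGet? treeGrid row).getD []
    else treeGrid.map (fun treeline => PySem.List.pyGetD treeline row 0)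
  let nline : Int := PySem.List.len treeRow
  let visionFromSide := List.replicate treeRow.length true
  let visionFromSide :=
    if side == "left" || side == "up" then
      ((PySem.List.pyRange 1 (nline - 1) 1).foldl (visLoopA treeRow)
        (PySem.List.pyGetD treeRow 0 0, visionFromSide)).2
    else visionFromSide
  let visionFromSide :=
    if side == "right" || side == "down" then
      ((PySem.List.pyRange (nline - 2) (-1) (-1)).foldl (visLoopA treeRow)
        (PySem.List.pyGetD treeRow (-1) 0, visionFromSide)).2
    else visionFromSide
  visionFromSide

-- ===== PORT B =====
-- _runningMax: best = None; for h: best = h if best is None or h > best else best; table.append(best)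
def runningMaxAlt (xs : List Int) : List Int :=
  (xs.foldl (fun (st : Option Int × List Int) h =>
      let best := match st.1 with
                  | none => h
                  | some m => if h > m then h else m
      (some best, st.2 ++ [best])) ((none : Option Int), [])).2

def getVisionFromSide_alt (treeGrid : List (List Int)) (side : String) (row : Int) : List Bool :=
  let treeRow : List Int :=
    if side == "left" || side == "right" then (PySem.List.pyGet? treeGrid row).getD []
    else treeGrid.map (fun treeline => PySem.List.pyGetD treeline row 0)
  let n : Int := PySem.List.len treeRow
  if side == "left" || side == "up" then
    let highest := runningMaxAlt treeRow
    (PySem.List.pyRange 0 n 1).map (fun i =>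
      decide (i = 0) ||
      decide (PySem.List.pyGetD treeRow i 0 > PySem.List.pyGetD highest (i - 1) 0))
  else if side == "right" || side == "down" then
    -- treeRow[::-1] is PySem.List.slice? … (-1)
    let highest := (PySem.List.slice? (runningMaxAlt ((PySem.List.slice? treeRow none none (-1)).getD [])) none none (-1)).getD []
    (PySem.List.pyRange 0 n 1).map (fun i =>
      decide (i = n - 1) ||
      decide (PySem.List.pyGetD treeRow i 0 > PySem.List.pyGetD highest (i + 1) 0))
  else List.replicate treeRow.length true

-- ===== PRECONDITION & SPEC =====
-- Pre_ excludes exactly the inputs where Python A raises IndexError: an out-of-range row index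
-- (into the grid for left/right, into some line otherwise), or an empty extracted row/column
-- when one of the four side names makes A read its first/last element.
def Pre_getVisionFromSide (treeGrid : List (List Int)) (side : String) (row : Int) : Prop :=
  if side == "left" || side == "right" then
    PySem.Raise.InRange treeGrid.length row ∧ (PySem.List.pyGet? treeGrid row).getD [] ≠ []
  else
    (∀ line ∈ treeGrid, PySem.Raise.InRange line.length row) ∧
    ((side == "up" || side == "down") = true → treeGrid ≠ [])
instance (treeGrid : List (List Int)) (side : String) (row : Int) : Decidable (Pre_getVisionFromSide treeGrid side row) := by
  unfold Pre_getVisionFromSide; infer_instance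

def pvWitness_getVisionFromSide : List (List Int) × String × Int := ([[3, 1, 2], [0, 5, 1]], "left", 0)

-- For side "left"/"up" on a row of length ≥ 2 whose last tree is not strictly taller than all
-- before it, A's loop range(1, nline-1) never judges the last index and returns True there,
-- while B returns False — the intended answer: that tree is not visible from that side.
def D_getVisionFromSide (treeGrid : List (List Int)) (side : String) (row : Int) : Prop :=
  let r := if side = "left" then (PySem.List.pyGet? treeGrid row).getD []
           else treeGrid.map (fun line => PySem.List.pyGetD line row 0)
  (side = "left" ∨ side = "up") ∧ 2 ≤ r.length ∧
    r.getD (r.length - 1) 0 ≤ (r.take (r.length - 1)).foldl max (r.getD 0 0)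
instance (treeGrid : List (List Int)) (side : String) (row : Int) : Decidable (D_getVisionFromSide treeGrid side row) := by
  unfold D_getVisionFromSide; infer_instance

def Spec_getVisionFromSide (treeGrid : List (List Int)) (side : String) (row : Int) (out : List Bool) : Prop := ¬ D_getVisionFromSide treeGrid side row → out = getVisionFromSide_alt treeGrid side row
instance (treeGrid : List (List Int)) (side : String) (row : Int) (out : List Bool) : Decidable (Spec_getVisionFromSide treeGrid side row out) := by unfold Spec_getVisionFromSide; infer_instance

def pvDiffWitness_getVisionFromSide : List (List Int) × String × Int := ([[2, 1]], "left", 0)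
def pvDiffWitnessOut_getVisionFromSide : (List Bool) × (List Bool) := ([true, true], [true, false])

-- ===== CLAIM (what is proved, stated in full; the proofs are below) =====
def Claim_unchanged_getVisionFromSide : Prop := ∀ (treeGrid : List (List Int)) (side : String) (row : Int), Dom_getVisionFromSide treeGrid side row → Pre_getVisionFromSide treeGrid side row → Spec_getVisionFromSide treeGrid side row (getVisionFromSide treeGrid side row)
def Claim_changed_getVisionFromSide : Prop := Dom_getVisionFromSide (pvDiffWitness_getVisionFromSide.1) (pvDiffWitness_getVisionFromSide.2.1) (pvDiffWitness_getVisionFromSide.2.2) ∧ Pre_getVisionFromSide (pvDiffWitness_getVisionFromSide.1) (pvDiffWitness_getVisionFromSide.2.1) (pvDiffWitness_getVisionFromSide.2.2) ∧ D_getVisionFromSide (pvDiffWitness_getVisionFromSide.1) (pvDiffWitness_getVisionFromSide.2.1) (pvDiffWitness_getVisionFromSide.2.2) ∧ getVisionFromSide (pvDiffWitness_getVisionFromSide.1) (pvDiffWitness_getVisionFromSide.2.1) (pvDiffWitness_getVisionFromSide.2.2) = pvDiffWitnessOut_getVisionFromSide.1 ∧ getVisionFromSide_alt (pvDiffWitness_getVisionFromSide.1)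 (pvDiffWitness_getVisionFromSide.2.1) (pvDiffWitness_getVisionFromSide.2.2) = pvDiffWitnessOut_getVisionFromSide.2 ∧ pvDiffWitnessOut_getVisionFromSide.1 ≠ pvDiffWitnessOut_getVisionFromSide.2
def Claim_exact_getVisionFromSide : Prop := ∀ (treeGrid : List (List Int)) (side : String) (row : Int), Dom_getVisionFromSide treeGrid side row → Pre_getVisionFromSide treeGrid side row → D_getVisionFromSide treeGrid side row → getVisionFromSide treeGrid side row ≠ getVisionFromSide_alt treeGrid side row

-- ===== LEMMAS AND PROOFS =====

def pmRec : Int → List Int → List Int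
  | m, [] => [m]
  | m, h :: t => m :: pmRec (if h > m then h else m) t

theorem pmRec_head (m : Int) (t : List Int) : pmRec m t = m :: (pmRec m t).drop 1 := by
  cases t <;> rfl

theorem rm_aux (t : List Int) : ∀ (m : Int) (pre : List Int),
    (t.foldl (fun (st : Option Int × List Int) h =>
      let best := match st.1 with
                  | none => h
                  | some m => if h > m then h else m
      (some best, st.2 ++ [best])) (some m, pre)).2 = pre ++ ((pmRec m t).drop 1) := by
  induction t with
  | nil => intro m pre; simp [pmRec]
  | cons h t ih =>
    intro m pre
    simp only [List.foldl_cons, pmRec, List.drop_succ_cons]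
    rw [ih]
    conv_rhs => rw [pmRec_head]
    simp

theorem runningMaxAlt_cons (h : Int) (t : List Int) : runningMaxAlt (h :: t) = pmRec h t := by
  unfold runningMaxAlt
  simp only [List.foldl_cons]
  rw [show ([] : List Int) ++ [h] = [h] from rfl]
  rw [rm_aux t h [h]]
  conv_rhs => rw [pmRec_head]
  simp

theorem length_pmRec (m : Int) (t : List Int) : (pmRec m t).length = t.length + 1 := by
  induction t generalizing m with
  | nil => simp [pmRec]
  | cons h t ih => simp [pmRec, ih]

theorem pmRec_zero (m : Int) (t : List Int) : (pmRec m t).getD 0 0 = m := by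
  cases t <;> simp [pmRec]

theorem pmRec_succ (m : Int) (t : List Int) : ∀ k : Nat, k < t.length →
    (pmRec m t).getD (k + 1) 0 =
      if t.getD k 0 > (pmRec m t).getD k 0 then t.getD k 0 else (pmRec m t).getD k 0 := by
  induction t generalizing m with
  | nil => intro k hk; simp at hk
  | cons h t ih =>
    intro k hk
    match k with
    | 0 =>
      simp only [pmRec, List.getD_cons_succ, List.getD_cons_zero]
      rw [pmRec_zero]
    | k + 1 =>
      simp only [pmRec, List.getD_cons_succ, List.length_cons] at *
      exact ih _ k (by omega)

theorem pmRec_getD_take (t : List Int) : ∀ (m : Int) (k : Nat), k ≤ t.length →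
    (pmRec m t).getD k 0 = (t.take k).foldl max m := by
  induction t with
  | nil =>
    intro m k hk
    have hk0 : k = 0 := by simpa using hk
    subst hk0; simp [pmRec]
  | cons h t ih =>
    intro m k hk
    match k with
    | 0 => simpa using pmRec_zero m (h :: t)
    | k + 1 =>
      simp only [pmRec, List.getD_cons_succ, List.take_succ_cons, List.foldl_cons]
      rw [ih _ k (by simpa using hk)]
      congr 1
      omega

theorem set_map_range (n k : Nat) (f : Nat → Bool) (b : Bool) (_hk : k < n) :
    ((List.range n).map f).set k b = (List.range n).map (fun j => if j = k then b else f j) := by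
  apply List.ext_getElem
  · simp
  · intro i h1 h2
    simp only [List.getElem_set, List.getElem_map, List.getElem_range]
    by_cases h : k = i
    · simp [h]
    · have : ¬ i = k := fun hh => h hh.symm
      simp [h, this]

theorem leftFold (r0 : Int) (rs : List Int) (f : Nat → Bool) :
    ∀ kN : Nat, kN ≤ rs.length →
    (PySem.List.pyRange 1 (kN : Int) 1).foldl (visLoopA (r0 :: rs))
        (r0, (List.range (rs.length + 1)).map f)
    = ((pmRec r0 rs).getD (kN - 1) 0,
       (List.range (rs.length + 1)).map (fun j =>
          if 1 ≤ j ∧ j < kN ∧ ¬((r0 :: rs).getD j 0 > (pmRec r0 rs).getD (j - 1) 0)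
          then false else f j)) := by
  intro kN
  induction kN with
  | zero =>
    intro _
    rw [PySem.List.pyRange_one_eq_nil (by norm_num)]
    simp only [List.foldl_nil]
    refine congrArg₂ Prod.mk ?_ ?_
    · exact (pmRec_zero r0 rs).symm
    · exact (List.map_congr_left (fun j hj => by
        have : ¬ (1 ≤ j ∧ j < 0 ∧ ¬((r0 :: rs).getD j 0 > (pmRec r0 rs).getD (j - 1) 0)) := by omega
        rw [if_neg this])).symm
  | succ kN ih =>
    intro hle
    by_cases hk0 : kN = 0
    · subst hk0
      rw [show ((0:Nat) + 1 : Nat) = (1:Nat) from rfl]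
      rw [show ((1:Nat) : Int) = 1 from rfl, PySem.List.pyRange_one_eq_nil (by norm_num)]
      simp only [List.foldl_nil]
      refine congrArg₂ Prod.mk ?_ ?_
      · exact (pmRec_zero r0 rs).symm
      · exact (List.map_congr_left (fun j hj => by
          have : ¬ (1 ≤ j ∧ j < 1 ∧ ¬((r0 :: rs).getD j 0 > (pmRec r0 rs).getD (j - 1) 0)) := by omega
          rw [if_neg this])).symm
    · have hcast : ((kN + 1 : Nat) : Int) = (kN : Int) + 1 := by push_cast; ring
      rw [hcast, PySem.List.pyRange_one_succ_right (by exact_mod_cast Nat.one_le_iff_ne_zero.mpr hk0),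
          List.foldl_append, ih (by omega)]
      simp only [Nat.add_sub_cancel]
      have hkn : kN < rs.length + 1 := by omega
      have hget : PySem.List.pyGetD (r0 :: rs) ((kN : Nat) : Int) 0 = (r0 :: rs).getD kN 0 := by
        simp [PySem.List.pyGetD_natCast]
      have hcons : (r0 :: rs).getD kN 0 = rs.getD (kN - 1) 0 := by
        match kN, hk0 with
        | k + 1, _ => simp
      have hstep : (pmRec r0 rs).getD kN 0 =
          if rs.getD (kN - 1) 0 > (pmRec r0 rs).getD (kN - 1) 0 then rs.getD (kN - 1) 0
          else (pmRec r0 rs).getD (kN - 1) 0 := by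
        have := pmRec_succ r0 rs (kN - 1) (by omega)
        rwa [show kN - 1 + 1 = kN by omega] at this
      simp only [List.foldl_cons, List.foldl_nil, visLoopA, hget, hcons]
      by_cases hge : (pmRec r0 rs).getD (kN - 1) 0 ≥ rs.getD (kN - 1) 0
      · rw [if_pos hge]
        simp only [PySem.List.pySetD_natCast]
        rw [set_map_range _ kN _ _ hkn]
        refine congrArg₂ Prod.mk ?_ ?_
        · rw [hstep, if_neg (by omega)]
        · apply List.map_congr_left
          intro j hj
          simp only [List.mem_range] at hj
          by_cases hjk : j = kN
          · subst hjk
            rw [if_pos rfl, if_pos ⟨by omega, by omega, by rw [hcons]; omega⟩]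
          · rw [if_neg hjk]
            by_cases hc : 1 ≤ j ∧ j < kN ∧ ¬((r0 :: rs).getD j 0 > (pmRec r0 rs).getD (j - 1) 0)
            · rw [if_pos hc, if_pos ⟨hc.1, by omega, hc.2.2⟩]
            · rw [if_neg hc, if_neg (by intro h; exact hc ⟨h.1, by omega, h.2.2⟩)]
      · rw [if_neg hge]
        refine congrArg₂ Prod.mk ?_ ?_
        · rw [hstep, if_pos (by omega)]
        · apply List.map_congr_left
          intro j hj
          simp only [List.mem_range] at hj
          by_cases hjk : j = kN
          · subst hjk
            rw [if_neg (by omega), if_neg (by intro h; exact h.2.2 (by rw [hcons]; omega))]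
          · by_cases hc : 1 ≤ j ∧ j < kN ∧ ¬((r0 :: rs).getD j 0 > (pmRec r0 rs).getD (j - 1) 0)
            · rw [if_pos hc, if_pos ⟨hc.1, by omega, hc.2.2⟩]
            · rw [if_neg hc, if_neg (by intro h; exact hc ⟨h.1, by omega, h.2.2⟩)]

theorem getD_reverse {α : Type} (l : List α) (i : Nat) (hi : i < l.length) (d : α) :
    l.reverse.getD i d = l.getD (l.length - 1 - i) d := by
  rw [List.getD_eq_getElem _ _ (by simpa using hi), List.getD_eq_getElem _ _ (by omega),
      List.getElem_reverse]

theorem rev_ne_nil (r : List Int) (h : r ≠ []) : r.reverse ≠ [] := by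
  intro hnil; exact h (by simpa using congrArg List.reverse hnil)

theorem sm_getD_last (r : List Int) (h : r ≠ []) :
    ((runningMaxAlt r.reverse).reverse).getD (r.length - 1) 0 = r.getD (r.length - 1) 0 := by
  obtain ⟨m, t, hrr⟩ := List.exists_cons_of_ne_nil (rev_ne_nil r h)
  have hn : r.length = t.length + 1 := by
    have := congrArg List.length hrr; simpa using this
  rw [hrr, runningMaxAlt_cons,
      getD_reverse (pmRec m t) (r.length - 1) (by rw [length_pmRec]; omega)]
  have e1 : (pmRec m t).length - 1 - (r.length - 1) = 0 := by rw [length_pmRec]; omega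
  have e0 : r.length - 1 = t.length := by omega
  rw [e1, pmRec_zero, e0]
  conv_rhs => rw [← List.reverse_reverse r, hrr,
    getD_reverse (m :: t) t.length (by simp)]
  have e2 : (m :: t).length - 1 - t.length = 0 := by simp
  rw [e2, List.getD_cons_zero]

theorem sm_getD_step (r : List Int) (j : Nat) (hj : j + 1 < r.length) :
    ((runningMaxAlt r.reverse).reverse).getD j 0 =
      if r.getD j 0 > ((runningMaxAlt r.reverse).reverse).getD (j + 1) 0 then r.getD j 0
      else ((runningMaxAlt r.reverse).reverse).getD (j + 1) 0 := by
  have h : r ≠ [] := by intro hnil; rw [hnil] at hj; simp at hj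
  obtain ⟨m, t, hrr⟩ := List.exists_cons_of_ne_nil (rev_ne_nil r h)
  have hn : r.length = t.length + 1 := by
    have := congrArg List.length hrr; simpa using this
  rw [hrr, runningMaxAlt_cons,
      getD_reverse (pmRec m t) j (by rw [length_pmRec]; omega),
      getD_reverse (pmRec m t) (j + 1) (by rw [length_pmRec]; omega)]
  have e1 : (pmRec m t).length - 1 - j = (t.length - 1 - j) + 1 := by rw [length_pmRec]; omega
  have e2 : (pmRec m t).length - 1 - (j + 1) = t.length - 1 - j := by rw [length_pmRec]; omega
  rw [e1, e2, pmRec_succ m t (t.length - 1 - j) (by omega)]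
  have hr : r.getD j 0 = t.getD (t.length - 1 - j) 0 := by
    conv_lhs => rw [← List.reverse_reverse r, hrr,
      getD_reverse (m :: t) j (by simp; omega)]
    have e3 : (m :: t).length - 1 - j = (t.length - 1 - j) + 1 := by simp; omega
    rw [e3, List.getD_cons_succ]
  rw [hr]

theorem rightFold (r : List Int) (hr : r ≠ []) :
    ∀ aN : Nat, aN ≤ r.length - 1 → ∀ f : Nat → Bool,
    (PySem.List.pyRange ((aN : Int) - 1) (-1) (-1)).foldl (visLoopA r)
      (((runningMaxAlt r.reverse).reverse).getD aN 0, (List.range r.length).map f)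
    = (((runningMaxAlt r.reverse).reverse).getD 0 0,
       (List.range r.length).map (fun j =>
         if j < aN ∧ ¬(r.getD j 0 > ((runningMaxAlt r.reverse).reverse).getD (j + 1) 0)
         then false else f j)) := by
  intro aN
  induction aN with
  | zero =>
    intro _ f
    rw [show ((0 : Nat) : Int) - 1 = -1 by norm_num,
        PySem.List.pyRange_neg_one_eq_nil (by norm_num)]
    simp only [List.foldl_nil]
    refine congrArg₂ Prod.mk rfl ?_
    exact (List.map_congr_left (fun j hj => by
      rw [if_neg (by omega)])).symm
  | succ aN ih =>
    intro hle f
    have hn1 : 1 ≤ r.length := by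
      cases r with | nil => exact absurd rfl hr | cons a b => simp
    have hcast : ((aN + 1 : Nat) : Int) - 1 = (aN : Nat) := by push_cast; ring
    rw [hcast, PySem.List.pyRange_neg_one_cons (by omega)]
    simp only [List.foldl_cons, visLoopA]
    have hget : PySem.List.pyGetD r ((aN : Nat) : Int) 0 = r.getD aN 0 := by
      simp [PySem.List.pyGetD_natCast]
    have hstep := sm_getD_step r aN (by omega)
    by_cases hge : ((runningMaxAlt r.reverse).reverse).getD (aN + 1) 0 ≥ r.getD aN 0
    · rw [if_pos (by rw [hget]; exact hge)]
      simp only [PySem.List.pySetD_natCast]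
      rw [set_map_range _ aN _ _ (by omega)]
      have heq : ((runningMaxAlt r.reverse).reverse).getD (aN + 1) 0 = ((runningMaxAlt r.reverse).reverse).getD aN 0 := by
        rw [hstep, if_neg (by omega)]
      rw [heq, ih (by omega)]
      refine congrArg₂ Prod.mk rfl ?_
      apply List.map_congr_left
      intro j hj
      simp only [List.mem_range] at hj
      by_cases hjk : j = aN
      · subst hjk
        rw [if_neg (by omega), if_pos rfl, if_pos ⟨by omega, by omega⟩]
      · by_cases hc : j < aN ∧ ¬(r.getD j 0 > ((runningMaxAlt r.reverse).reverse).getD (j + 1) 0)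
        · rw [if_pos hc, if_pos ⟨by omega, hc.2⟩]
        · rw [if_neg hc, if_neg hjk, if_neg (by intro hx; exact hc ⟨by omega, hx.2⟩)]
    · rw [if_neg (by rw [hget]; exact hge)]
      have heq : r.getD aN 0 = ((runningMaxAlt r.reverse).reverse).getD aN 0 := by
        rw [hstep, if_pos (by omega)]
      rw [hget, heq, ih (by omega)]
      refine congrArg₂ Prod.mk rfl ?_
      apply List.map_congr_left
      intro j hj
      simp only [List.mem_range] at hj
      by_cases hjk : j = aN
      · subst hjk
        rw [if_neg (by omega), if_neg (by intro hx; exact hx.2 (by omega))]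
      · by_cases hc : j < aN ∧ ¬(r.getD j 0 > ((runningMaxAlt r.reverse).reverse).getD (j + 1) 0)
        · rw [if_pos hc, if_pos ⟨by omega, hc.2⟩]
        · rw [if_neg hc, if_neg (by intro hx; exact hc ⟨by omega, hx.2⟩)]

theorem replicate_eq_map_range (n : Nat) (b : Bool) :
    List.replicate n b = (List.range n).map (fun _ => b) := by
  rw [List.map_const', List.length_range]

-- A's left/up pass characterised index-wise: true at 0 and at the never-visited last index,
-- and a strict running-max comparison everywhere between.
theorem leftCaseA (r : List Int) (hne : r ≠ []) :
    ((PySem.List.pyRange 1 (PySem.List.len r - 1) 1).foldl (visLoopA r)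
      (PySem.List.pyGetD r 0 0, List.replicate r.length true)).2
    = (PySem.List.pyRange 0 (PySem.List.len r) 1).map (fun i =>
        decide (i = 0) || decide (i = PySem.List.len r - 1) ||
        decide (PySem.List.pyGetD r i 0 > PySem.List.pyGetD (runningMaxAlt r) (i - 1) 0)) := by
  obtain ⟨r0, rs, rfl⟩ := List.exists_cons_of_ne_nil hne
  have hlen1 : PySem.List.len (r0 :: rs) - 1 = ((rs.length : Nat) : Int) := by
    simp [PySem.List.len_eq]
  have hlen0 : PySem.List.len (r0 :: rs) = (((rs.length + 1 : Nat)) : Int) := by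
    simp [PySem.List.len_eq]
  rw [hlen1, hlen0, PySem.List.pyGetD_zero_cons, List.length_cons,
      replicate_eq_map_range, leftFold r0 rs (fun _ => true) rs.length le_rfl,
      PySem.List.pyRange_zero_nat, List.map_map]
  apply List.map_congr_left
  intro j hj
  simp only [List.mem_range, Function.comp] at hj ⊢
  rw [runningMaxAlt_cons]
  by_cases hj0 : j = 0
  · subst hj0
    rw [if_neg (by omega)]
    simp
  · by_cases hjl : j = rs.length
    · subst hjl
      rw [if_neg (by omega)]
      simp
    · have h1j : 1 ≤ j := by omega
      have hjlt : j < rs.length := by omega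
      have hd1 : ((j : Nat) : Int) - 1 = (((j - 1 : Nat)) : Int) := by omega
      rw [hd1]
      simp only [PySem.List.pyGetD_natCast]
      have hne0 : ¬ ((j : Nat) : Int) = 0 := by omega
      have hnel : ¬ ((j : Nat) : Int) = ((rs.length + 1 : Nat) : Int) - 1 := by push_cast; omega
      simp only [hne0, decide_false, Bool.false_or]
      by_cases hX : (r0 :: rs).getD j 0 > (pmRec r0 rs).getD (j - 1) 0
      · rw [if_neg (fun hc => hc.2.2 hX)]
        have hX' : ((pmRec r0 rs)[j - 1]?.getD 0 < (r0 :: rs)[j]?.getD 0) := hX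
        simp [hX'] <;> omega
      · rw [if_pos ⟨h1j, hjlt, hX⟩]
        have hX' : ¬ ((pmRec r0 rs)[j - 1]?.getD 0 < (r0 :: rs)[j]?.getD 0) := hX
        simp [hX'] <;> omega

-- the last tree is visible from the left iff the "blocked" relation of D_ fails
theorem gt_top (r0 : Int) (rs : List Int) (h1 : 1 ≤ rs.length) :
    (PySem.List.pyGetD (r0 :: rs) ((rs.length : Nat) : Int) 0 >
       PySem.List.pyGetD (runningMaxAlt (r0 :: rs)) (((rs.length : Nat) : Int) - 1) 0)
    ↔ ¬ ((r0 :: rs).getD ((r0 :: rs).length - 1) 0 ≤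
          ((r0 :: rs).take ((r0 :: rs).length - 1)).foldl max ((r0 :: rs).getD 0 0)) := by
  have hd1 : ((rs.length : Nat) : Int) - 1 = (((rs.length - 1 : Nat)) : Int) := by omega
  rw [hd1, runningMaxAlt_cons]
  simp only [PySem.List.pyGetD_natCast]
  have hlhs : (r0 :: rs).getD rs.length 0 = rs.getD (rs.length - 1) 0 := by
    obtain ⟨k, hk⟩ : ∃ k, rs.length = k + 1 := ⟨rs.length - 1, by omega⟩
    rw [hk]; simp
  have hpm : (pmRec r0 rs).getD (rs.length - 1) 0 = (rs.take (rs.length - 1)).foldl max r0 :=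
    pmRec_getD_take rs r0 (rs.length - 1) (by omega)
  have hlen : (r0 :: rs).length - 1 = rs.length := by simp
  have htake : (r0 :: rs).take rs.length = r0 :: rs.take (rs.length - 1) := by
    obtain ⟨k, hk⟩ : ∃ k, rs.length = k + 1 := ⟨rs.length - 1, by omega⟩
    rw [hk]; simp
  have hfold : ((r0 :: rs).take ((r0 :: rs).length - 1)).foldl max ((r0 :: rs).getD 0 0)
      = (rs.take (rs.length - 1)).foldl max r0 := by
    rw [hlen, htake, List.getD_cons_zero, List.foldl_cons, max_self]
  rw [hfold]
  constructor
  · intro hgt hle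
    have h1' : (pmRec r0 rs)[rs.length - 1]?.getD 0 < (r0 :: rs)[rs.length]?.getD 0 := hgt
    rw [hlen] at hle
    simp only [← List.getD_eq_getElem?_getD] at h1'
    omega
  · intro hnle
    rw [hlen] at hnle
    show (pmRec r0 rs)[rs.length - 1]?.getD 0 < (r0 :: rs)[rs.length]?.getD 0
    simp only [← List.getD_eq_getElem?_getD]
    omega

-- outside the blocked relation, A's extra "last index" disjunct is redundant: the two maps agree
theorem left_maps_eq (r : List Int) (hne : r ≠ [])
    (hnb : ¬ (2 ≤ r.length ∧ r.getD (r.length - 1) 0 ≤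
              (r.take (r.length - 1)).foldl max (r.getD 0 0))) :
    (PySem.List.pyRange 0 (PySem.List.len r) 1).map (fun i =>
        decide (i = 0) || decide (i = PySem.List.len r - 1) ||
        decide (PySem.List.pyGetD r i 0 > PySem.List.pyGetD (runningMaxAlt r) (i - 1) 0))
    = (PySem.List.pyRange 0 (PySem.List.len r) 1).map (fun i =>
        decide (i = 0) ||
        decide (PySem.List.pyGetD r i 0 > PySem.List.pyGetD (runningMaxAlt r) (i - 1) 0)) := by
  obtain ⟨r0, rs, rfl⟩ := List.exists_cons_of_ne_nil hne
  have hlen0 : PySem.List.len (r0 :: rs) = (((rs.length + 1 : Nat)) : Int) := by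
    simp [PySem.List.len_eq]
  rw [hlen0, PySem.List.pyRange_zero_nat, List.map_map, List.map_map]
  apply List.map_congr_left
  intro j hj
  simp only [List.mem_range] at hj
  simp only [Function.comp]
  by_cases hj0 : j = 0
  · subst hj0; simp
  · by_cases hjl : j = rs.length
    · subst hjl
      have h1 : 1 ≤ rs.length := by omega
      have hgt : PySem.List.pyGetD (r0 :: rs) ((rs.length : Nat) : Int) 0 >
          PySem.List.pyGetD (runningMaxAlt (r0 :: rs)) (((rs.length : Nat) : Int) - 1) 0 := by
        rw [gt_top r0 rs h1]
        intro hle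
        exact hnb ⟨by simp; omega, hle⟩
      have he : ((rs.length : Nat) : Int) = ((rs.length + 1 : Nat) : Int) - 1 := by
        push_cast; ring
      have hgt' : PySem.List.pyGetD (runningMaxAlt (r0 :: rs)) (((rs.length : Nat) : Int) - 1) 0 <
          (r0 :: rs)[rs.length] := by
        have hx := hgt
        rw [PySem.List.pyGetD_natCast, List.getD_eq_getElem _ _ (by simp)] at hx
        exact hx
      simp [← he, hgt']
    · simp [hjl]

-- inside the blocked relation they really differ: at the last index A keeps true, B computes false
theorem left_maps_ne (r : List Int)
    (hb : 2 ≤ r.length ∧ r.getD (r.length - 1) 0 ≤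
          (r.take (r.length - 1)).foldl max (r.getD 0 0)) :
    (PySem.List.pyRange 0 (PySem.List.len r) 1).map (fun i =>
        decide (i = 0) || decide (i = PySem.List.len r - 1) ||
        decide (PySem.List.pyGetD r i 0 > PySem.List.pyGetD (runningMaxAlt r) (i - 1) 0))
    ≠ (PySem.List.pyRange 0 (PySem.List.len r) 1).map (fun i =>
        decide (i = 0) ||
        decide (PySem.List.pyGetD r i 0 > PySem.List.pyGetD (runningMaxAlt r) (i - 1) 0)) := by
  have hne : r ≠ [] := by
    intro h
    rw [h] at hb
    simp at hb
  obtain ⟨r0, rs, rfl⟩ := List.exists_cons_of_ne_nil hne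
  have h1 : 1 ≤ rs.length := by have := hb.1; simp at this; omega
  have hlen0 : PySem.List.len (r0 :: rs) = (((rs.length + 1 : Nat)) : Int) := by
    simp [PySem.List.len_eq]
  rw [hlen0, PySem.List.pyRange_zero_nat, List.map_map, List.map_map]
  intro heq
  have h2 := congrArg (fun l => l[rs.length]?) heq
  simp only [List.getElem?_map] at h2
  rw [List.getElem?_range (by omega)] at h2
  simp only [Option.map_some, Option.some.injEq, Function.comp] at h2
  have hngt : ¬ (PySem.List.pyGetD (r0 :: rs) ((rs.length : Nat) : Int) 0 >
      PySem.List.pyGetD (runningMaxAlt (r0 :: rs)) (((rs.length : Nat) : Int) - 1) 0) := by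
    rw [gt_top r0 rs h1]
    intro hnle; exact hnle hb.2
  have he : ((rs.length : Nat) : Int) = ((rs.length + 1 : Nat) : Int) - 1 := by
    push_cast; ring
  have hne0 : ¬ ((rs.length : Nat) : Int) = 0 := by omega
  rw [← he] at h2
  simp [hne0] at h2
  rcases h2 with h2 | h2
  · rw [h2] at h1; simp at h1
  · apply hngt
    rw [PySem.List.pyGetD_natCast, List.getD_eq_getElem _ _ (by simp)]
    exact h2

theorem rightCase (r : List Int) (hne : r ≠ []) :
    ((PySem.List.pyRange (PySem.List.len r - 2) (-1) (-1)).foldl (visLoopA r)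
      (PySem.List.pyGetD r (-1) 0, List.replicate r.length true)).2
    = (PySem.List.pyRange 0 (PySem.List.len r) 1).map (fun i =>
        decide (i = PySem.List.len r - 1) ||
        decide (PySem.List.pyGetD r i 0 > PySem.List.pyGetD ((PySem.List.slice? (runningMaxAlt ((PySem.List.slice? r none none (-1)).getD [])) none none (-1)).getD []) (i + 1) 0)) := by
  have hn1 : 1 ≤ r.length := by cases r with | nil => exact absurd rfl hne | cons a b => simp
  have hsl : ((PySem.List.slice? r none none (-1)).getD []) = r.reverse := by
    rw [PySem.List.slice?_none_none_neg_one]; rfl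
  have hsl2 : ((PySem.List.slice? (runningMaxAlt r.reverse) none none (-1)).getD []) = (runningMaxAlt r.reverse).reverse := by
    rw [PySem.List.slice?_none_none_neg_one]; rfl
  rw [hsl, hsl2]
  have hlen2 : PySem.List.len r - 2 = (((r.length - 1 : Nat)) : Int) - 1 := by
    simp [PySem.List.len_eq]; omega
  have hlen0 : PySem.List.len r = ((r.length : Nat) : Int) := by simp [PySem.List.len_eq]
  have hprev : PySem.List.pyGetD r (-1) 0 = ((runningMaxAlt r.reverse).reverse).getD (r.length - 1) 0 := by
    rw [PySem.List.pyGetD_neg_one (h := hne), sm_getD_last r hne, List.getD_eq_getElem _ _ (by omega),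
        List.getLast_eq_getElem]
  rw [hlen2, hlen0, hprev, replicate_eq_map_range,
      rightFold r hne (r.length - 1) le_rfl (fun _ => true),
      PySem.List.pyRange_zero_nat, List.map_map]
  apply List.map_congr_left
  intro j hj
  simp only [List.mem_range, Function.comp] at hj ⊢
  by_cases hjl : j = r.length - 1
  · subst hjl
    rw [if_neg (by omega)]
    have : ((r.length - 1 : Nat) : Int) = ((r.length : Nat) : Int) - 1 := by omega
    simp [this]
  · have hjlt : j < r.length - 1 := by omega
    have hnel : ¬ ((j : Nat) : Int) = ((r.length : Nat) : Int) - 1 := by omega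
    have hd1 : ((j : Nat) : Int) + 1 = (((j + 1 : Nat)) : Int) := by omega
    rw [hd1]
    simp only [PySem.List.pyGetD_natCast, hnel, decide_false, Bool.false_or]
    by_cases hX : r.getD j 0 > ((runningMaxAlt r.reverse).reverse).getD (j + 1) 0
    · rw [if_neg (fun hc => hc.2 hX)]
      have hX' : ((runningMaxAlt r.reverse).reverse[j + 1]?.getD 0 < r[j]?.getD 0) := hX
      simp [hX'] <;> omega
    · rw [if_pos ⟨hjlt, hX⟩]
      have hX' : ¬ ((runningMaxAlt r.reverse).reverse[j + 1]?.getD 0 < r[j]?.getD 0) := hX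
      simp [hX'] <;> omega

-- ===== VERDICT (by name: the statement is the Claim_ definition above) =====
theorem getVisionFromSide_spec : Claim_unchanged_getVisionFromSide := by
  intro G side row _ hpre
  unfold Spec_getVisionFromSide
  intro hnd
  by_cases hL : side = "left"
  · subst hL
    simp only [getVisionFromSide, getVisionFromSide_alt]
    norm_num
    have hne : (PySem.List.pyGet? G row).getD [] ≠ [] := by
      simp only [Pre_getVisionFromSide] at hpre
      norm_num at hpre
      exact hpre.2
    refine (leftCaseA _ hne).trans (left_maps_eq _ hne ?_)
    intro hb
    exact hnd (by simp only [D_getVisionFromSide]; norm_num; exact hb)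
  · by_cases hR : side = "right"
    · subst hR
      simp only [getVisionFromSide, getVisionFromSide_alt]
      norm_num
      have hne : (PySem.List.pyGet? G row).getD [] ≠ [] := by
        simp only [Pre_getVisionFromSide] at hpre
        norm_num at hpre
        exact hpre.2
      exact rightCase _ hne
    · by_cases hU : side = "up"
      · subst hU
        simp only [getVisionFromSide, getVisionFromSide_alt]
        norm_num
        have hne : G.map (fun l => PySem.List.pyGetD l row 0) ≠ [] := by
          simp only [Pre_getVisionFromSide] at hpre
          norm_num at hpre
          simpa using hpre.2
        refine (leftCaseA _ hne).trans (left_maps_eq _ hne ?_)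
        intro hb
        refine hnd ?_
        simp only [D_getVisionFromSide]
        norm_num
        rw [if_neg (show ¬ ("up" : String) = "left" by decide)]
        exact hb
      · by_cases hD : side = "down"
        · subst hD
          simp only [getVisionFromSide, getVisionFromSide_alt]
          norm_num
          have hne : G.map (fun l => PySem.List.pyGetD l row 0) ≠ [] := by
            simp only [Pre_getVisionFromSide] at hpre
            norm_num at hpre
            simpa using hpre.2
          exact rightCase _ hne
        · simp only [getVisionFromSide, getVisionFromSide_alt]
          have bL : (side == "left") = false := by simpa using hL
          have bR : (side == "right") = false := by simpa using hR
          have bU : (side == "up") = false := by simpa using hU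
          have bD : (side == "down") = false := by simpa using hD
          simp [bL, bR, bU, bD]

theorem getVisionFromSide_changed : Claim_changed_getVisionFromSide := by
  unfold Claim_changed_getVisionFromSide; decide

theorem getVisionFromSide_tight : Claim_exact_getVisionFromSide := by
  intro G side row _ hpre hd
  obtain ⟨hside, hb⟩ := (by simpa only [D_getVisionFromSide] using hd :
    (side = "left" ∨ side = "up") ∧ _)
  rcases hside with hL | hU
  · subst hL
    simp only [getVisionFromSide, getVisionFromSide_alt]
    norm_num
    have hne : (PySem.List.pyGet? G row).getD [] ≠ [] := by
      simp only [Pre_getVisionFromSide] at hpre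
      norm_num at hpre
      exact hpre.2
    exact fun heq => left_maps_ne _ (by simpa using hb) ((leftCaseA _ hne).symm.trans heq)
  · subst hU
    simp only [getVisionFromSide, getVisionFromSide_alt]
    norm_num
    have hne : G.map (fun l => PySem.List.pyGetD l row 0) ≠ [] := by
      simp only [Pre_getVisionFromSide] at hpre
      norm_num at hpre
      simpa using hpre.2
    exact fun heq => left_maps_ne _ (by simpa using hb) ((leftCaseA _ hne).symm.trans heq)
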